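-- pv_equiv track=rewrite | github.com/hikarinessa/advent_2020 | advent_2020_martin/Scripts/09_EncodingError.py | num_is_valid
-- ===== SOURCE A (Python) =====
-- def num_is_valid(num: int, previous_nums: list):
--     # This is ugly but it prevents adding a num to itself, without disqualifying duplicates
--     for i, n1 in enumerate(previous_nums):
--         for j, n2 in enumerate(previous_nums):
--             if i == j:
--                 continue
--             elif n1 + n2 == num:
--                 return True
--     return False
-- ===== SOURCE B (Python) =====
-- def num_is_valid(num: int, previous_nums: list):
--     # One-pass two-sum: check each number against the set of numbers seen before it.
--     seen = set()
--     for n in previous_nums: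
--         if num - n in seen:
--             return True
--         seen.add(n)
--     return False
-- ===== Notes on version B (the rewrite author's own statement) =====
-- stated objective: faster
-- what changed: Replaced the O(n^2) double scan over all index pairs with a single pass keeping a hash set of previously seen values, checking num - n membership.
import Mathlib
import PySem

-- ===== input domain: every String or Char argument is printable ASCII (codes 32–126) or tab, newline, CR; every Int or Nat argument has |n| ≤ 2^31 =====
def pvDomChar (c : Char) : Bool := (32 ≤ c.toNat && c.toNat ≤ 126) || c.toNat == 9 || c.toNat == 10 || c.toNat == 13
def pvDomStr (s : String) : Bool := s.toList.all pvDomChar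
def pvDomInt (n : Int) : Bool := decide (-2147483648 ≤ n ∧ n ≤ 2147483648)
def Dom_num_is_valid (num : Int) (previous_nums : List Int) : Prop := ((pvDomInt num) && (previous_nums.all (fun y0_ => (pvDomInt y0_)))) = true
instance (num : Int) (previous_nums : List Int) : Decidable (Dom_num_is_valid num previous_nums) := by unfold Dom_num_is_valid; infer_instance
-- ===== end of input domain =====

-- B replaces A's O(n^2) double index scan by a single pass with a set of previously seen values.

-- ===== PORT A =====
-- inner 'for j, n2 in enumerate(previous_nums)' loop (early return True)
def pvAInner (num : Int) (i : Int) (n1 : Int) : List (Int × Int) → Bool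
  | [] => false
  | (j, n2) :: rest =>
    if i == j then pvAInner num i n1 rest
    else if n1 + n2 == num then true
    else pvAInner num i n1 rest

-- outer 'for i, n1 in enumerate(previous_nums)' loop; e is the full enumerated list scanned by the inner loop
def pvAOuter (num : Int) (e : List (Int × Int)) : List (Int × Int) → Bool
  | [] => false
  | (i, n1) :: rest =>
    if pvAInner num i n1 e then true
    else pvAOuter num e rest

def num_is_valid (num : Int) (previous_nums : List Int) : Bool :=
  pvAOuter num (PySem.List.enumerate previous_nums) (PySem.List.enumerate previous_nums)

-- ===== PORT B =====
-- 'for n in previous_nums: if num - n in seen: return True; seen.add(n)'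
def pvBLoop (num : Int) (seen : PySem.Set Int) : List Int → Bool
  | [] => false
  | n :: rest =>
    if PySem.Set.contains seen (num - n) then true
    else pvBLoop num (PySem.Set.add seen n) rest

def num_is_valid_alt (num : Int) (previous_nums : List Int) : Bool :=
  pvBLoop num PySem.Set.empty previous_nums

-- ===== PRECONDITION & SPEC =====
def Spec_num_is_valid (num : Int) (previous_nums : List Int) (out : Bool) : Prop := out = num_is_valid_alt num previous_nums
instance (num : Int) (previous_nums : List Int) (out : Bool) : Decidable (Spec_num_is_valid num previous_nums out) := by unfold Spec_num_is_valid; infer_instance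

-- ===== CLAIM (what is proved, stated in full; the proofs are below) =====
def Claim_equal_num_is_valid : Prop := ∀ (num : Int) (previous_nums : List Int), Dom_num_is_valid num previous_nums → Spec_num_is_valid num previous_nums (num_is_valid num previous_nums)

-- ===== LEMMAS AND PROOFS =====

-- "some pair of distinct positions sums to num"
def pvPair (num : Int) (l : List Int) : Prop :=
  ∃ (k1 k2 : Nat) (h1 : k1 < l.length) (h2 : k2 < l.length), k1 ≠ k2 ∧ l[k1] + l[k2] = num

-- structural characterisation used as a bridge between the two ports
def pvSB (num : Int) : List Int → Bool
  | [] => false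
  | n :: rest => decide ((num - n) ∈ rest) || pvSB num rest

theorem pvAInner_eq_any (num i n1 : Int) (e : List (Int × Int)) :
    pvAInner num i n1 e = e.any (fun p => !(i == p.1) && (n1 + p.2 == num)) := by
  induction e with
  | nil => simp [pvAInner]
  | cons p rest ih =>
    obtain ⟨j, n2⟩ := p
    cases hb : (i == j) <;> cases hs : (n1 + n2 == num) <;>
      simp [pvAInner, hb, hs, ih]

theorem pvAOuter_eq_any (num : Int) (E e : List (Int × Int)) :
    pvAOuter num E e = e.any (fun p => pvAInner num p.1 p.2 E) := by
  induction e with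
  | nil => simp [pvAOuter]
  | cons p rest ih =>
    obtain ⟨i, n1⟩ := p
    cases h : pvAInner num i n1 E <;> simp [pvAOuter, h, ih]

theorem pvA_iff (num : Int) (l : List Int) :
    num_is_valid num l = true ↔ pvPair num l := by
  unfold num_is_valid pvPair
  rw [pvAOuter_eq_any]
  simp only [List.any_eq_true, pvAInner_eq_any, Bool.and_eq_true, Bool.not_eq_eq_eq_not,
    Bool.not_true, beq_eq_false_iff_ne, ne_eq, beq_iff_eq, PySem.List.mem_enumerate_iff]
  constructor
  · rintro ⟨p, ⟨k1, h1, rfl⟩, q, ⟨k2, h2, rfl⟩, hne, hsum⟩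
    simp only [zero_add] at hne hsum
    refine ⟨k1, k2, h1, h2, ?_, hsum⟩
    intro h; exact hne (by exact_mod_cast h)
  · rintro ⟨k1, k2, h1, h2, hne, hsum⟩
    refine ⟨((k1 : Int), l[k1]), ⟨k1, h1, by simp⟩,
            ((k2 : Int), l[k2]), ⟨k2, h2, by simp⟩, ?_, hsum⟩
    intro h
    simp only at h
    exact hne (by exact_mod_cast h)

theorem pvSB_iff (num : Int) (l : List Int) :
    pvSB num l = true ↔ pvPair num l := by
  induction l with
  | nil => simp [pvSB, pvPair]
  | cons n rest ih =>
    simp only [pvSB, Bool.or_eq_true, decide_eq_true_eq, ih]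
    unfold pvPair
    constructor
    · rintro (hmem | hp)
      · obtain ⟨k, hk, hget⟩ := List.getElem_of_mem hmem
        refine ⟨0, k + 1, by simp, by simp only [List.length_cons]; omega, by omega, ?_⟩
        simp only [List.getElem_cons_zero, List.getElem_cons_succ, hget]
        omega
      · obtain ⟨k1, k2, h1, h2, hne, hsum⟩ := hp
        refine ⟨k1 + 1, k2 + 1, by simp only [List.length_cons]; omega,
          by simp only [List.length_cons]; omega, by omega, ?_⟩
        simpa using hsum
    · rintro ⟨k1, k2, h1, h2, hne, hsum⟩
      simp only [List.length_cons] at h1 h2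
      match k1, k2 with
      | 0, 0 => omega
      | 0, k2 + 1 =>
        left
        have hk2 : k2 < rest.length := by omega
        have : rest[k2]'hk2 = num - n := by
          simp only [List.getElem_cons_zero, List.getElem_cons_succ] at hsum; omega
        exact this ▸ List.getElem_mem hk2
      | k1 + 1, 0 =>
        left
        have hk1 : k1 < rest.length := by omega
        have : rest[k1]'hk1 = num - n := by
          simp only [List.getElem_cons_zero, List.getElem_cons_succ] at hsum; omega
        exact this ▸ List.getElem_mem hk1
      | k1 + 1, k2 + 1 =>
        right
        exact ⟨k1, k2, by omega, by omega, by omega, by simpa using hsum⟩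

theorem pvBLoop_eq (num : Int) (l : List Int) : ∀ seen : PySem.Set Int,
    pvBLoop num seen l = (l.any (fun x => decide ((num - x) ∈ seen)) || pvSB num l) := by
  induction l with
  | nil => intro seen; simp [pvBLoop, pvSB]
  | cons n rest ih =>
    intro seen
    by_cases hc : (num - n) ∈ seen
    · simp [pvBLoop, hc]
    · rw [pvBLoop]
      simp only [hc, decide_false, List.any_cons, pvSB]
      have hcf : PySem.Set.contains seen (num - n) = false := by simp [hc]
      rw [hcf]
      simp only [Bool.false_eq_true, if_false]
      rw [ih]
      have hany : rest.any (fun x => decide ((num - x) ∈ PySem.Set.add seen n))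
          = (rest.any (fun x => decide ((num - x) ∈ seen)) || decide ((num - n) ∈ rest)) := by
        rw [Bool.eq_iff_iff]
        simp only [List.any_eq_true, decide_eq_true_eq, Bool.or_eq_true, PySem.Set.mem_add]
        constructor
        · rintro ⟨x, hx, hy | hy⟩
          · exact Or.inl ⟨x, hx, hy⟩
          · right
            have hxe : x = num - n := by omega
            rw [← hxe]; exact hx
        · rintro (⟨x, hx, hy⟩ | hy)
          · exact ⟨x, hx, Or.inl hy⟩
          · exact ⟨num - n, hy, Or.inr (by omega)⟩
      rw [hany]
      cases h1 : rest.any (fun x => decide ((num - x) ∈ seen)) <;>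
        cases h2 : decide ((num - n) ∈ rest) <;> simp

theorem pvB_eq (num : Int) (l : List Int) : num_is_valid_alt num l = pvSB num l := by
  unfold num_is_valid_alt
  rw [pvBLoop_eq]
  simp [PySem.Set.empty]

-- ===== VERDICT (by name: the statement is the Claim_ definition above) =====
theorem num_is_valid_spec : Claim_equal_num_is_valid := by
  intro num l _
  unfold Spec_num_is_valid
  rw [pvB_eq, Bool.eq_iff_iff, pvA_iff, pvSB_iff]
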